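-- pv_equiv track=rewrite | github.com/tqylorl/galatiq-case-invoices | app/parsers/txt_parser.py | _normalize_item_text
-- ===== SOURCE A (Python) =====
-- def _normalize_item_text(line: str) -> str:
--     normalized = line
--     replacements = {
--         "Widget A": "WidgetA",
--         "Widget B": "WidgetB",
--         "Gadget X": "GadgetX",
--     }
--     for old, new in replacements.items():
--         normalized = normalized.replace(old, new)
--     return normalized
-- ===== SOURCE B (Python) =====
-- def _normalize_item_text(line: str) -> str:
--     # One left-to-right pass: at each position emit either a replaced chunk or the char.
--     out = []
--     i = 0
--     n = len(line)
--     while i < n: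
--         if line.startswith("Widget A", i):
--             out.append("WidgetA")
--             i += 8
--         elif line.startswith("Widget B", i):
--             out.append("WidgetB")
--             i += 8
--         elif line.startswith("Gadget X", i):
--             out.append("GadgetX")
--             i += 8
--         else:
--             out.append(line[i])
--             i += 1
--     return "".join(out)
-- ===== Notes on version B (the rewrite author's own statement) =====
-- stated objective: alternative
-- what changed: Replaced three sequential full-string str.replace passes by a single left-to-right scan that matches the three keys at each position and emits replacement chunks directly.
import Mathlib
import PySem

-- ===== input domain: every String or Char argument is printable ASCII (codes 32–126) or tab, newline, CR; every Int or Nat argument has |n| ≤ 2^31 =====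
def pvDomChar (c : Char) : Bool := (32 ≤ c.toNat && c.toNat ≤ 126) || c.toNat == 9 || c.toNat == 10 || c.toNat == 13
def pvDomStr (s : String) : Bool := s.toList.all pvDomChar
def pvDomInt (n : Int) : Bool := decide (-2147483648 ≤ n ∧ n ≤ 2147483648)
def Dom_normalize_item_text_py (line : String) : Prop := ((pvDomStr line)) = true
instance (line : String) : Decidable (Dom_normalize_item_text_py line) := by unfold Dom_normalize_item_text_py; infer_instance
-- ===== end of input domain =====

-- B replaces A's three sequential full-string .replace passes by one left-to-right scan
-- emitting replacement chunks (objective: alternative single-pass algorithm, same result).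

-- ===== PORT A =====
def normalize_item_text_py (line : String) : String :=
  let replacements : PySem.Dict String String :=
    PySem.Dict.ofList [("Widget A", "WidgetA"), ("Widget B", "WidgetB"), ("Gadget X", "GadgetX")]
  replacements.items.foldl (fun normalized ov => PySem.Str.replace normalized ov.1 ov.2) line

-- ===== PORT B =====
-- B's while-loop over positions: at each position emit a replaced chunk (advance 8) or the char (advance 1).
def onepassCore : List Char → List Char
  | [] => []
  | c :: rest =>
    if "Widget A".toList.isPrefixOf (c :: rest) then "WidgetA".toList ++ onepassCore (rest.drop 7)
    else if "Widget B".toList.isPrefixOf (c :: rest) then "WidgetB".toList ++ onepassCore (rest.drop 7)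
    else if "Gadget X".toList.isPrefixOf (c :: rest) then "GadgetX".toList ++ onepassCore (rest.drop 7)
    else c :: onepassCore rest
termination_by l => l.length
decreasing_by all_goals (simp; try omega)

def normalize_item_text_py_alt (line : String) : String :=
  String.ofList (onepassCore line.toList)

-- ===== PRECONDITION & SPEC =====
def Spec_normalize_item_text_py (line : String) (out : String) : Prop := out = normalize_item_text_py_alt line
instance (line : String) (out : String) : Decidable (Spec_normalize_item_text_py line out) := by unfold Spec_normalize_item_text_py; infer_instance

-- ===== CLAIM (what is proved, stated in full; the proofs are below) =====
def Claim_equal_normalize_item_text_py : Prop := ∀ (line : String), Dom_normalize_item_text_py line → Spec_normalize_item_text_py line (normalize_item_text_py line)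

-- ===== LEMMAS AND PROOFS =====

-- Clean recursive characterization of PySem.Chars.replace (for old ≠ []).
def rep (old new : List Char) : List Char → List Char
  | [] => []
  | c :: t =>
    if old.isPrefixOf (c :: t) then new ++ rep old new (t.drop (old.length - 1))
    else c :: rep old new t
termination_by l => l.length
decreasing_by all_goals (simp; try omega)

theorem go_eq_rep (old new : List Char) (h : old ≠ []) :
    ∀ fuel l acc, l.length ≤ fuel →
      PySem.Chars.replace.go old new fuel l acc = acc.reverse ++ rep old new l := by
  intro fuel
  induction fuel with
  | zero =>
    intro l acc hl
    have : l = [] := List.eq_nil_of_length_eq_zero (Nat.le_zero.mp hl)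
    subst this
    simp [PySem.Chars.replace.go, rep]
  | succ n ih =>
    intro l acc hl
    cases l with
    | nil => simp [PySem.Chars.replace.go, rep]
    | cons c t =>
      rw [PySem.Chars.replace.go]
      by_cases hp : old.isPrefixOf (c :: t) = true
      · rw [if_pos hp]
        have hlen : (List.drop old.length (c :: t)).length ≤ n := by
          have : 1 ≤ old.length := by
            cases old with
            | nil => exact absurd rfl h
            | cons o os => simp
          simp at hl ⊢
          omega
        rw [ih _ _ hlen]
        have hdrop : List.drop old.length (c :: t) = t.drop (old.length - 1) := by
          cases old with
          | nil => exact absurd rfl h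
          | cons o os => simp
        rw [rep, if_pos hp, hdrop]
        simp
      · rw [if_neg hp]
        have hlen : t.length ≤ n := by simp at hl; omega
        rw [ih _ _ hlen, rep, if_neg hp]
        simp

theorem replace_eq_rep (s old new : List Char) (h : old ≠ []) :
    PySem.Chars.replace s old new = rep old new s := by
  rw [PySem.Chars.replace]
  rw [if_neg (by simp [List.isEmpty_iff, h])]
  simpa using go_eq_rep old new h s.length s []

-- Barrier d pat: no nonempty suffix of d is prefix-comparable with pat;
-- hence no occurrence of pat in d ++ s can start inside d.
def Barrier (d pat : List Char) : Bool :=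
  d.tails.all (fun u => u.isEmpty || (!(decide (u <+: pat)) && !(decide (pat <+: u))))

theorem barrier_spec {d pat : List Char} (h : Barrier d pat = true) {u : List Char}
    (hu : u ≠ []) (hsuf : u <:+ d) : ¬ u <+: pat ∧ ¬ pat <+: u := by
  have := List.all_eq_true.mp h u ((List.mem_tails u d).mpr hsuf)
  simp [List.isEmpty_iff, hu] at this
  exact this

theorem rep_cons_neg {old : List Char} (new : List Char) {c : Char} {t : List Char}
    (h : ¬ old <+: (c :: t)) : rep old new (c :: t) = c :: rep old new t := by
  rw [rep, if_neg (by simpa [List.isPrefixOf_iff_prefix] using h)]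

theorem rep_match (old new s : List Char) (h : old ≠ []) :
    rep old new (old ++ s) = new ++ rep old new s := by
  cases old with
  | nil => exact absurd rfl h
  | cons o os =>
    rw [List.cons_append, rep,
      if_pos (by simp [List.isPrefixOf_iff_prefix])]
    simp

theorem rep_emit (old new : List Char) {d : List Char} (s : List Char)
    (h : Barrier d old = true) : rep old new (d ++ s) = d ++ rep old new s := by
  induction d with
  | nil => simp
  | cons c d' ih =>
    have hb' : Barrier d' old = true := by
      simp only [Barrier, List.tails_cons, List.all_cons, Bool.and_eq_true] at h
      exact h.2
    have hnp : ¬ old <+: ((c :: d') ++ s) := by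
      intro hp
      rcases Nat.le_total old.length (c :: d').length with hl | hl
      · exact (barrier_spec h (by simp) (List.suffix_refl _)).2
          (List.prefix_of_prefix_length_le hp (List.prefix_append _ _) hl)
      · exact (barrier_spec h (by simp) (List.suffix_refl _)).1
          (List.prefix_of_prefix_length_le (List.prefix_append _ _) hp hl)
    rw [List.cons_append, rep_cons_neg new (by simpa using hnp), ih hb']
    simp

theorem rep_no_create (old new k : List Char)
    (hb : Barrier k new = true) :
    ∀ s u, u ≠ [] → u <:+ k → u <+: rep old new s → u <+: s := by
  intro s
  induction s using rep.induct old with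
  | case1 =>
    intro u hu _ hp
    rw [rep] at hp
    exact absurd (List.prefix_nil.mp hp) hu
  | case2 c t hpre ih =>
    intro u hu hsuf hp
    rw [rep, if_pos hpre] at hp
    exfalso
    rcases Nat.le_total u.length new.length with hl | hl
    · exact (barrier_spec hb hu hsuf).1
        (List.prefix_of_prefix_length_le hp (List.prefix_append _ _) hl)
    · exact (barrier_spec hb hu hsuf).2
        (List.prefix_of_prefix_length_le (List.prefix_append _ _) hp hl)
  | case3 c t hpre ih =>
    intro u hu hsuf hp
    rw [rep, if_neg hpre] at hp
    cases u with
    | nil => exact absurd rfl hu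
    | cons a u' =>
      obtain ⟨ha, hp'⟩ := List.cons_prefix_cons.mp hp
      subst ha
      cases u' with
      | nil => simp
      | cons b u'' =>
        have hsuf' : (b :: u'') <:+ k := (List.suffix_cons _ _).trans hsuf
        exact List.cons_prefix_cons.mpr ⟨rfl, ih _ (by simp) hsuf' hp'⟩

theorem core_eq (s : List Char) :
    rep "Gadget X".toList "GadgetX".toList
      (rep "Widget B".toList "WidgetB".toList
        (rep "Widget A".toList "WidgetA".toList s)) = onepassCore s := by
  induction s using onepassCore.induct with
  | case1 => simp only [rep, onepassCore]
  | case2 c rest h1 ih =>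
    obtain ⟨t, ht⟩ := List.isPrefixOf_iff_prefix.mp h1
    have hdrop : rest.drop 7 = t := by
      have : (c :: rest).drop 8 = t := by rw [← ht]; rfl
      simpa using this
    rw [onepassCore, if_pos h1, ← ht, hdrop,
      rep_match _ _ _ (by decide),
      rep_emit _ _ _ (by decide),
      rep_emit _ _ _ (by decide)]
    rw [hdrop] at ih
    rw [ih]
  | case3 c rest h1 h2 ih =>
    obtain ⟨t, ht⟩ := List.isPrefixOf_iff_prefix.mp h2
    have hdrop : rest.drop 7 = t := by
      have : (c :: rest).drop 8 = t := by rw [← ht]; rfl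
      simpa using this
    rw [onepassCore, if_neg h1, if_pos h2, ← ht, hdrop,
      rep_emit _ _ _ (by decide),
      rep_match _ _ _ (by decide),
      rep_emit _ _ _ (by decide)]
    rw [hdrop] at ih
    rw [ih]
  | case4 c rest h1 h2 h3 ih =>
    obtain ⟨t, ht⟩ := List.isPrefixOf_iff_prefix.mp h3
    have hdrop : rest.drop 7 = t := by
      have : (c :: rest).drop 8 = t := by rw [← ht]; rfl
      simpa using this
    rw [onepassCore, if_neg h1, if_neg h2, if_pos h3, ← ht, hdrop,
      rep_emit _ _ _ (by decide),
      rep_emit _ _ _ (by decide),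
      rep_match _ _ _ (by decide)]
    rw [hdrop] at ih
    rw [ih]
  | case5 c rest h1 h2 h3 ih =>
    have n1 : ¬ "Widget A".toList <+: (c :: rest) := by
      simpa [List.isPrefixOf_iff_prefix] using h1
    have n2 : ¬ "Widget B".toList <+: rep "Widget A".toList "WidgetA".toList (c :: rest) := by
      intro hp
      exact absurd
        (rep_no_create _ _ _ (by decide) _ _ (by decide) (List.suffix_refl _) hp)
        (by simpa [List.isPrefixOf_iff_prefix] using h2)
    have n3 : ¬ "Gadget X".toList <+:
        rep "Widget B".toList "WidgetB".toList
          (rep "Widget A".toList "WidgetA".toList (c :: rest)) := by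
      intro hp
      have step1 := rep_no_create "Widget B".toList "WidgetB".toList "Gadget X".toList
        (by decide) _ _ (by decide) (List.suffix_refl _) hp
      have step2 := rep_no_create "Widget A".toList "WidgetA".toList "Gadget X".toList
        (by decide) _ _ (by decide) (List.suffix_refl _) step1
      exact absurd step2 (by simpa [List.isPrefixOf_iff_prefix] using h3)
    have e1 : rep "Widget A".toList "WidgetA".toList (c :: rest)
        = c :: rep "Widget A".toList "WidgetA".toList rest := rep_cons_neg _ n1
    rw [e1] at n2 n3
    have e2 : rep "Widget B".toList "WidgetB".toList
          (c :: rep "Widget A".toList "WidgetA".toList rest)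
        = c :: rep "Widget B".toList "WidgetB".toList
            (rep "Widget A".toList "WidgetA".toList rest) := rep_cons_neg _ n2
    rw [e2] at n3
    rw [onepassCore, if_neg h1, if_neg h2, if_neg h3, e1, e2, rep_cons_neg _ n3, ih]

theorem ports_agree (line : String) :
    normalize_item_text_py line = normalize_item_text_py_alt line := by
  have hfold : normalize_item_text_py line =
      PySem.Str.replace (PySem.Str.replace (PySem.Str.replace line "Widget A" "WidgetA")
        "Widget B" "WidgetB") "Gadget X" "GadgetX" := by
    rfl
  have htl : (normalize_item_text_py line).toList = onepassCore line.toList := by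
    rw [hfold]
    simp only [PySem.Str.toList_replace]
    rw [replace_eq_rep _ _ _ (by decide), replace_eq_rep _ _ _ (by decide),
      replace_eq_rep _ _ _ (by decide), core_eq]
  calc normalize_item_text_py line
      = String.ofList (normalize_item_text_py line).toList := by simp
    _ = String.ofList (onepassCore line.toList) := by rw [htl]
    _ = normalize_item_text_py_alt line := rfl

-- ===== VERDICT (by name: the statement is the Claim_ definition above) =====
theorem normalize_item_text_py_spec : Claim_equal_normalize_item_text_py := by
  intro line _
  unfold Spec_normalize_item_text_py
  exact ports_agree line
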